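-- pv_equiv track=rewrite | github.com/ChickenNuggets50/CS-3500-Programming-Languages-and-Translators | 2023-FS-101-hw1-lgs6bv-master/2023-FS-101-hw1-lgs6bv-master/lexer.py | is_valid_character_literal
-- ===== SOURCE A (Python) =====
-- def is_valid_character_literal(string):
--     state = 0
--     valid_hex_chars = set("0123456789ABCDEF")
--     for c in string:
--         if state == 0:
--             if c in valid_hex_chars:
--                 state = 1
--             else:
--                 state = 4
--         elif state == 1:
--             if c in valid_hex_chars:
--                 state = 2
--             else:
--                 state = 4
--         elif state == 2:
--             if c == "X":
--                 state = 3
--             else: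
--                 state = 4
--         else:
--             state = 4
--
--     if state == 3:
--         return True
--     else:
--         return False
-- ===== SOURCE B (Python) =====
-- def is_valid_character_literal(string):
--     hex_digits = set("0123456789ABCDEF")
--     return (len(string) == 3
--             and string[0] in hex_digits
--             and string[1] in hex_digits
--             and string[2] == "X")
-- ===== Notes on version B (the rewrite author's own statement) =====
-- stated objective: faster
-- what changed: Replaced the per-character DFA loop over a state variable with a closed-form check: length == 3, two indexed hex-digit membership tests, and a final uppercase-X comparison, so long strings are rejected without scanning.
import Mathlib
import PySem

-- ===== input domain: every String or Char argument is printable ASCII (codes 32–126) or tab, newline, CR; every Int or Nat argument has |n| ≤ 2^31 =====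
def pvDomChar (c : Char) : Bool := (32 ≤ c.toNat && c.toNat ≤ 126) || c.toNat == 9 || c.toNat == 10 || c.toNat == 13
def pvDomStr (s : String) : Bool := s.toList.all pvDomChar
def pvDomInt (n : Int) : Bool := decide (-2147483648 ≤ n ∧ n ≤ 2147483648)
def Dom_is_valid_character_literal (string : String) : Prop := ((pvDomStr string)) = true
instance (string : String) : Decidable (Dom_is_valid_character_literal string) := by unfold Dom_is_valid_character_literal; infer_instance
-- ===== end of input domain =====

-- B replaces A's per-character DFA loop with a closed-form check (length 3, two hex digits, final 'X'); objective: simpler.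

-- ===== PORT A =====
-- valid_hex_chars = set("0123456789ABCDEF")
def pvHexA : PySem.Set Char := PySem.Set.ofList "0123456789ABCDEF".toList

-- one iteration of A's for-loop: the DFA transition on the state variable
def pvStepA (state : Int) (c : Char) : Int :=
  if state = 0 then (if pvHexA.contains c then 1 else 4)
  else if state = 1 then (if pvHexA.contains c then 2 else 4)
  else if state = 2 then (if c = 'X' then 3 else 4)
  else 4

def is_valid_character_literal (string : String) : Bool :=
  let state := string.toList.foldl pvStepA 0
  if state = 3 then true else false

-- ===== PORT B =====
-- hex_digits = set("0123456789ABCDEF")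
def pvHexB : PySem.Set Char := PySem.Set.ofList "0123456789ABCDEF".toList

-- len(string) == 3 and string[0] in hex_digits and string[1] in hex_digits and string[2] == "X"
def is_valid_character_literal_alt (string : String) : Bool :=
  let cs := string.toList
  decide (PySem.Chars.len cs = 3)
    && (PySem.List.pyGet? cs 0).any (fun c => pvHexB.contains c)
    && (PySem.List.pyGet? cs 1).any (fun c => pvHexB.contains c)
    && (PySem.List.pyGet? cs 2).any (fun c => c = 'X')

-- ===== PRECONDITION & SPEC =====
def Spec_is_valid_character_literal (string : String) (out : Bool) : Prop := out = is_valid_character_literal_alt string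
instance (string : String) (out : Bool) : Decidable (Spec_is_valid_character_literal string out) := by unfold Spec_is_valid_character_literal; infer_instance

-- ===== CLAIM (what is proved, stated in full; the proofs are below) =====
def Claim_equal_is_valid_character_literal : Prop := ∀ (string : String), Dom_is_valid_character_literal string → Spec_is_valid_character_literal string (is_valid_character_literal string)

-- ===== LEMMAS AND PROOFS =====
-- state 4 is absorbing: once the DFA is dead the rest of the string is ignored
theorem pv_foldl_dead (l : List Char) : l.foldl pvStepA 4 = 4 := by
  induction l with
  | nil => rfl
  | cons c t ih => simpa [pvStepA] using ih

-- ===== VERDICT (by name: the statement is the Claim_ definition above) =====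
theorem is_valid_character_literal_spec : Claim_equal_is_valid_character_literal := by
  intro string _
  unfold Spec_is_valid_character_literal is_valid_character_literal is_valid_character_literal_alt
  match h : string.toList with
  | [] => simp [PySem.Chars.len]
  | [a] => simp [pvStepA, PySem.Chars.len]; split_ifs <;> simp_all
  | [a, b] => simp [pvStepA, PySem.Chars.len]; split_ifs <;> simp_all
  | [a, b, c] =>
    simp [pvStepA, PySem.Chars.len, pvHexA, pvHexB]
    split_ifs <;> simp_all
  | a :: b :: c :: d :: t =>
    have h1 : pvStepA 0 a = 1 ∨ pvStepA 0 a = 4 := by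
      unfold pvStepA; split_ifs <;> simp_all
    have h2 : pvStepA (pvStepA 0 a) b = 2 ∨ pvStepA (pvStepA 0 a) b = 4 := by
      rcases h1 with h1 | h1 <;> rw [h1] <;> unfold pvStepA <;> split_ifs <;> simp_all
    have h3 : pvStepA (pvStepA (pvStepA 0 a) b) c = 3 ∨
        pvStepA (pvStepA (pvStepA 0 a) b) c = 4 := by
      rcases h2 with h2 | h2 <;> rw [h2] <;> unfold pvStepA <;> split_ifs <;> simp_all
    have h4 : pvStepA (pvStepA (pvStepA (pvStepA 0 a) b) c) d = 4 := by
      rcases h3 with h3 | h3 <;> rw [h3] <;> unfold pvStepA <;> split_ifs <;> simp_all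
    have hA : (a :: b :: c :: d :: t).foldl pvStepA 0 = 4 := by
      simp only [List.foldl]; rw [h4, pv_foldl_dead]
    simp [hA]
    intro h'
    exact absurd h' (by omega)
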